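-- pv_equiv track=rewrite | github.com/poojithayadavalli/codekata | sort elements in even indices.py | evenOddSort
-- ===== SOURCE A (Python) =====
-- def evenOddSort(inp):
--     l=[]
--     evens = [ inp[i] for i in range(0,len(inp)) if i%2==0 ]
--     odds = [ inp[i] for i in range(0,len(inp)) if i%2!=0 ]
--     evens.sort()
--     if len(evens)>len(odds):
--         for i in range(len(evens)-1):
--             l.append(evens[i])
--             l.append(odds[i])
--         l.append(evens[len(evens)-1])
--     else:
--         for i in range(len(evens)):
--             l.append(evens[i])
--             l.append(odds[i])
--     m=list(map(str,l))
--     return ' '.join(m)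
-- ===== SOURCE B (Python) =====
-- def evenOddSort(inp):
--     result = list(inp)
--     result[0::2] = sorted(inp[0::2])
--     return ' '.join(map(str, result))
-- ===== Notes on version B (the rewrite author's own statement) =====
-- stated objective: simpler
-- what changed: Replaces the two index-comprehensions plus the length-compare interleaving loop with its special last-element case by copying the input and assigning the sorted even-index strided slice in place (result[0::2] = sorted(inp[0::2])), so no interleave loop or parity case split exists.
import Mathlib
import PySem

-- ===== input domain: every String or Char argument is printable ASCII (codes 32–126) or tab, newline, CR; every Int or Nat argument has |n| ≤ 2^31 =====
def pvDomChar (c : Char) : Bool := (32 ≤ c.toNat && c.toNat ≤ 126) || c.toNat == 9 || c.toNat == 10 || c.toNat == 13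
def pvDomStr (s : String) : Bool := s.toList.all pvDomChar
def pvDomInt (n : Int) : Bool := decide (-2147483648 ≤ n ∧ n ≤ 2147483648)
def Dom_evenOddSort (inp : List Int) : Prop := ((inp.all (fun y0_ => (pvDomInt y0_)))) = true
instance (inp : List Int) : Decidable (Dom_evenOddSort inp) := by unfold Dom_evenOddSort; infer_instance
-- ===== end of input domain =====

-- B copies the input and assigns the sorted even-index strided slice in place instead of building
-- evens/odds index comprehensions and interleaving with a length-compare special case (objective:
-- simpler). Neither version observably mutates the argument (A sorts only its own temporary list;
-- B copies before the slice-assignment).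

-- ===== PORT A =====
def evenOddSort (inp : List Int) : String :=
  let evens := ((PySem.List.pyRange 0 (inp.length : Int) 1).filter
      (fun i => PySem.Int.mod i 2 == 0)).map (fun i => PySem.List.pyGetD inp i 0)
  let odds := ((PySem.List.pyRange 0 (inp.length : Int) 1).filter
      (fun i => !(PySem.Int.mod i 2 == 0))).map (fun i => PySem.List.pyGetD inp i 0)
  let se := PySem.List.sorted evens (fun x => x) false
  let l : List Int :=
    if se.length > odds.length then
      ((PySem.List.pyRange 0 ((se.length : Int) - 1) 1).foldl
        (fun acc i => (acc ++ [PySem.List.pyGetD se i 0]) ++ [PySem.List.pyGetD odds i 0]) [])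
        ++ [PySem.List.pyGetD se ((se.length : Int) - 1) 0]
    else
      (PySem.List.pyRange 0 (se.length : Int) 1).foldl
        (fun acc i => (acc ++ [PySem.List.pyGetD se i 0]) ++ [PySem.List.pyGetD odds i 0]) []
  PySem.Str.join " " (l.map PySem.Int.toStr)

-- ===== PORT B =====
-- hand port of the strided slice inp[0::2] (exact: the elements at indices 0,2,4,…); od2 is the
-- odd-index remainder that the slice-assignment leaves untouched
mutual
def ev2 : List Int → List Int
  | [] => []
  | x :: t => x :: od2 t
def od2 : List Int → List Int
  | [] => []
  | _ :: t => ev2 t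
end

-- hand port of 'result = list(inp); result[0::2] = vs' (exact here: vs always has length (ev2 inp).length)
def placeEven : List Int → List Int → List Int
  | [], _ => []
  | x :: t, [] => x :: t
  | _ :: t, v :: vs =>
      v :: (match t with
            | [] => []
            | y :: t' => y :: placeEven t' vs)

def evenOddSort_alt (inp : List Int) : String :=
  PySem.Str.join " "
    ((placeEven inp (PySem.List.sorted (ev2 inp) (fun x => x) false)).map PySem.Int.toStr)

-- ===== PRECONDITION & SPEC =====
def Spec_evenOddSort (inp : List Int) (out : String) : Prop := out = evenOddSort_alt inp
instance (inp : List Int) (out : String) : Decidable (Spec_evenOddSort inp out) := by unfold Spec_evenOddSort; infer_instance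

-- ===== CLAIM (what is proved, stated in full; the proofs are below) =====
def Claim_equal_evenOddSort : Prop := ∀ (inp : List Int), Dom_evenOddSort inp → Spec_evenOddSort inp (evenOddSort inp)

-- ===== LEMMAS AND PROOFS =====

-- A's index comprehensions, restated over Nat indices, are the structural stride lists
theorem natEO (xs : List Int) :
    ((List.range xs.length).filter (fun k => k % 2 == 0)).map (fun k => xs.getD k 0) = ev2 xs
    ∧ ((List.range xs.length).filter (fun k => k % 2 != 0)).map (fun k => xs.getD k 0) = od2 xs := by
  induction xs with
  | nil => simp [ev2, od2]
  | cons x t ih =>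
    have he : ∀ k ∈ List.range t.length, (((k + 1) % 2 == 0)) = (k % 2 != 0) := by
      intro k _; rcases Nat.mod_two_eq_zero_or_one k with h | h <;> simp [Nat.add_mod, h]
    have ho : ∀ k ∈ List.range t.length, (((k + 1) % 2 != 0)) = (k % 2 == 0) := by
      intro k _; rcases Nat.mod_two_eq_zero_or_one k with h | h <;> simp [Nat.add_mod, h]
    constructor
    · show ((List.range (t.length + 1)).filter _).map _ = _
      rw [List.range_succ_eq_map, List.filter_cons_of_pos (by simp), List.filter_map,
        List.map_cons, List.map_map]
      simp only [Function.comp_def, Nat.succ_eq_add_one]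
      rw [List.filter_congr he]
      simp only [List.getD_cons_succ, List.getD_cons_zero, ev2, ih.2]
    · show ((List.range (t.length + 1)).filter _).map _ = _
      rw [List.range_succ_eq_map, List.filter_cons_of_neg (by simp), List.filter_map,
        List.map_map]
      simp only [Function.comp_def, Nat.succ_eq_add_one]
      rw [List.filter_congr ho]
      simp only [List.getD_cons_succ, od2, ih.1]

theorem evod_expr (xs : List Int) :
    ((PySem.List.pyRange 0 (xs.length : Int) 1).filter
      (fun i => PySem.Int.mod i 2 == 0)).map (fun i => PySem.List.pyGetD xs i 0) = ev2 xs
    ∧ ((PySem.List.pyRange 0 (xs.length : Int) 1).filter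
      (fun i => !(PySem.Int.mod i 2 == 0))).map (fun i => PySem.List.pyGetD xs i 0) = od2 xs := by
  rw [PySem.List.pyRange_zero_nat, List.filter_map, List.filter_map]
  simp only [List.map_map, Function.comp_def]
  constructor
  · rw [List.filter_congr (q := fun k => k % 2 == 0)
      (by intro k _
          rw [show (PySem.Int.mod (k:Int) 2) = ((k % 2 : Nat) : Int) by
            exact_mod_cast PySem.Int.mod_natCast k 2]
          rcases Nat.mod_two_eq_zero_or_one k with h | h <;> simp [h])]
    rw [← (natEO xs).1]
    apply List.map_congr_left
    intro k _
    simp [PySem.List.pyGetD_natCast]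
  · rw [List.filter_congr (q := fun k => k % 2 != 0)
      (by intro k _
          rw [show (PySem.Int.mod (k:Int) 2) = ((k % 2 : Nat) : Int) by
            exact_mod_cast PySem.Int.mod_natCast k 2]
          rcases Nat.mod_two_eq_zero_or_one k with h | h <;> simp [h])]
    rw [← (natEO xs).2]
    apply List.map_congr_left
    intro k _
    simp [PySem.List.pyGetD_natCast]

-- the interleaving both programs produce, and its flattened-zip prefix form
def inter : List Int → List Int → List Int
  | [], _ => []
  | e :: _, [] => [e]
  | e :: es, o :: os => e :: o :: inter es os

def pairFlat (a b : List Int) : List Int := (a.zip b).flatMap (fun p => [p.1, p.2])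

-- A's append loop over range(k) builds the flattened zip of the two k-prefixes
theorem loopGen (se od : List Int) (k : Nat) :
    ∀ (acc : List Int), k ≤ se.length → k ≤ od.length →
    (PySem.List.pyRange 0 (k : Int) 1).foldl
      (fun acc i => (acc ++ [PySem.List.pyGetD se i 0]) ++ [PySem.List.pyGetD od i 0]) acc
    = acc ++ pairFlat (se.take k) (od.take k) := by
  induction k with
  | zero => intro acc _ _; simp [PySem.List.pyRange_one_eq_nil le_rfl, pairFlat]
  | succ k ih =>
    intro acc h1 h2
    have hcast : ((k + 1 : Nat) : Int) = (k : Int) + 1 := by push_cast; ring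
    rw [hcast, PySem.List.pyRange_one_succ_right (by positivity), List.foldl_append]
    rw [ih acc (by omega) (by omega)]
    simp only [List.foldl_cons, List.foldl_nil, PySem.List.pyGetD_natCast]
    rw [List.take_add_one, List.take_add_one, List.getD_eq_getElem?_getD]
    have hse : se[k]? = some se[k] := List.getElem?_eq_getElem (by omega)
    have hod : od[k]? = some od[k] := List.getElem?_eq_getElem (by omega)
    rw [hse, hod]
    simp only [pairFlat, Option.toList_some]
    rw [List.zip_append (by simp; omega)]
    simp [List.getD_eq_getElem?_getD, hod]

theorem inter_eq_pairFlat : ∀ (se od : List Int), se.length = od.length →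
    inter se od = pairFlat se od := by
  intro se
  induction se with
  | nil => intro od h; cases od <;> simp_all [inter, pairFlat]
  | cons e es ih =>
    intro od h
    cases od with
    | nil => simp at h
    | cons o os =>
      simp only [inter, pairFlat, List.zip_cons_cons, List.flatMap_cons]
      rw [← pairFlat, ← ih os (by simpa using h)]
      simp

theorem inter_odd : ∀ (od se : List Int), se.length = od.length + 1 →
    inter se od = pairFlat (se.take od.length) (od.take od.length) ++ [se.getD od.length 0] := by
  intro od
  induction od with
  | nil =>
    intro se h
    match se, h with
    | [e], _ => simp [inter, pairFlat]
  | cons o os ih =>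
    intro se h
    match se with
    | e :: es =>
      simp only [inter, List.length_cons, List.take_succ_cons, List.getD_cons_succ]
      rw [ih es (by simpa using h)]
      simp [pairFlat]

theorem placeEven_inter : ∀ (xs se : List Int), se.length = (ev2 xs).length →
    placeEven xs se = inter se (od2 xs) := by
  intro xs se
  induction xs, se using placeEven.induct with
  | case1 vs => intro h; simp [ev2] at h; subst h; simp [placeEven, inter]
  | case2 x t => intro h; simp [ev2] at h
  | case3 x t v vs ih =>
    intro h
    cases t with
    | nil =>
      simp [ev2] at h
      match vs, h with
      | [], _ => simp [placeEven, inter, od2, ev2]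
    | cons y t' =>
      simp only [placeEven, od2, ev2, inter]
      rw [ih (by simpa [ev2, od2] using h)]

theorem length_evod (xs : List Int) :
    (ev2 xs).length = (xs.length + 1) / 2 ∧ (od2 xs).length = xs.length / 2 := by
  induction xs with
  | nil => simp [ev2, od2]
  | cons x t ih => simp only [ev2, od2, List.length_cons]; omega

-- ===== VERDICT (by name: the statement is the Claim_ definition above) =====
theorem evenOddSort_spec : Claim_equal_evenOddSort := by
  intro inp _
  show evenOddSort inp = evenOddSort_alt inp
  unfold evenOddSort evenOddSort_alt
  simp only [(evod_expr inp).1, (evod_expr inp).2]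
  apply congrArg
  apply congrArg
  set se := PySem.List.sorted (ev2 inp) (fun x => x) false with hse
  have hm : se.length = (ev2 inp).length := PySem.List.length_sorted (ev2 inp) _ false
  have hlen := length_evod inp
  rw [placeEven_inter inp se hm]
  by_cases hgt : se.length > (od2 inp).length
  · rw [if_pos hgt]
    have heq : se.length = (od2 inp).length + 1 := by omega
    rw [show ((se.length : Int) - 1) = (((od2 inp).length : Nat) : Int) by omega]
    rw [loopGen se (od2 inp) (od2 inp).length [] (by omega) le_rfl,
      PySem.List.pyGetD_natCast,
      inter_odd (od2 inp) se (by omega)]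
    simp
  · rw [if_neg hgt]
    have heq : se.length = (od2 inp).length := by omega
    rw [loopGen se (od2 inp) se.length [] le_rfl (by omega)]
    rw [inter_eq_pairFlat se (od2 inp) heq, List.take_length, heq, List.take_length,
      List.nil_append]
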